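-- pv_equiv track=rewrite | github.com/peter88213/yw-cnv | dist/yw-cnv-L-1.35.2/yw-cnv/cnvyw.py | _convert_from_yw
-- ===== SOURCE A (Python) =====
-- def _convert_from_yw(text, quick=False):
--     ODS_REPLACEMENTS = [
--         ('&', '&amp;'),  # must be first!
--         ('"', '&quot;'),
--         ("'", '&apos;'),
--         ('>', '&gt;'),
--         ('<', '&lt;'),
--         ('\n', '</text:p>\n<text:p>'),
--     ]
--     try:
--         text = text.rstrip()
--         for yw, od in ODS_REPLACEMENTS:
--             text = text.replace(yw, od)
--     except AttributeError:
--         text = ''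
--     return text
-- ===== SOURCE B (Python) =====
-- def _convert_from_yw(text, quick=False):
--     table = {
--         '&': '&amp;',
--         '"': '&quot;',
--         "'": '&apos;',
--         '>': '&gt;',
--         '<': '&lt;',
--         '\n': '</text:p>\n<text:p>',
--     }
--     try:
--         text = text.rstrip()
--     except AttributeError:
--         return ''
--     return ''.join(table.get(c, c) for c in text)
-- ===== Notes on version B (the rewrite author's own statement) =====
-- stated objective: alternative
-- what changed: Replaces six sequential whole-string replace() passes with a single character scan through a lookup table joined once.
import Mathlib
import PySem

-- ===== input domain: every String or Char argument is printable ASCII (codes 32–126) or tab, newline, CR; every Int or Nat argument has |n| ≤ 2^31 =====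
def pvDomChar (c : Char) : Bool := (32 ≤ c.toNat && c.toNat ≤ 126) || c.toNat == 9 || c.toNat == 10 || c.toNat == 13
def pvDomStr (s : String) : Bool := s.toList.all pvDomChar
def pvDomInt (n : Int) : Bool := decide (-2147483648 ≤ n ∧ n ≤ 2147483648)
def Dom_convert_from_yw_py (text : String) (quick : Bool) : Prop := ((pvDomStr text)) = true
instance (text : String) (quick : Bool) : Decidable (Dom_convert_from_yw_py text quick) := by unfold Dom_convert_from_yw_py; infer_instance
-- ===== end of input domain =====

-- B replaces A's six sequential whole-string replace passes with one per-character
-- table-lookup scan joined once ('alternative' objective); same return value everywhere.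
-- (The Python-level AttributeError branch is unreachable for a String argument.)

-- ===== PORT A =====
def odsReplacements : List (String × String) :=
  [("&", "&amp;"), ("\"", "&quot;"), ("'", "&apos;"), (">", "&gt;"), ("<", "&lt;"),
   ("\n", "</text:p>\n<text:p>")]

def convert_from_yw_py (text : String) (quick : Bool) : String :=
  odsReplacements.foldl (fun t p => PySem.Str.replace t p.1 p.2) (PySem.Str.rstrip text)

-- ===== PORT B =====
-- the 6-entry dict lookup table.get(c, c), as a per-character lookup
def odsEsc (c : Char) : List Char :=
  if c = '&' then "&amp;".toList
  else if c = '"' then "&quot;".toList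
  else if c = '\'' then "&apos;".toList
  else if c = '>' then "&gt;".toList
  else if c = '<' then "&lt;".toList
  else if c = '\n' then "</text:p>\n<text:p>".toList
  else [c]

def convert_from_yw_py_alt (text : String) (quick : Bool) : String :=
  String.ofList ((PySem.Chars.rstrip text.toList).flatMap odsEsc)

-- ===== PRECONDITION & SPEC =====
def Spec_convert_from_yw_py (text : String) (quick : Bool) (out : String) : Prop := out = convert_from_yw_py_alt text quick
instance (text : String) (quick : Bool) (out : String) : Decidable (Spec_convert_from_yw_py text quick out) := by unfold Spec_convert_from_yw_py; infer_instance

-- ===== CLAIM (what is proved, stated in full; the proofs are below) =====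
def Claim_equal_convert_from_yw_py : Prop := ∀ (text : String) (quick : Bool), Dom_convert_from_yw_py text quick → Spec_convert_from_yw_py text quick (convert_from_yw_py text quick)

-- ===== LEMMAS AND PROOFS =====

-- single-character replacement is a flatMap
theorem replace_go_single (c : Char) (new : List Char) :
    ∀ (fuel : Nat) (l acc : List Char), l.length ≤ fuel →
      PySem.Chars.replace.go [c] new fuel l acc
        = acc.reverse ++ l.flatMap (fun x => if x = c then new else [x]) := by
  intro fuel
  induction fuel with
  | zero =>
    intro l acc h
    cases l with
    | nil => simp [PySem.Chars.replace.go]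
    | cons x t => simp at h
  | succ n ih =>
    intro l acc h
    cases l with
    | nil => simp [PySem.Chars.replace.go]
    | cons x t =>
      by_cases hx : x = c
      · subst hx
        have hpre : List.isPrefixOf [x] (x :: t) = true := by
          simp [List.isPrefixOf]
        simp only [PySem.Chars.replace.go, hpre, if_pos]
        have hdrop : List.drop ([x] : List Char).length (x :: t) = t := by simp
        rw [hdrop, ih t (new.reverse ++ acc) (by simpa using Nat.le_of_succ_le_succ h)]
        simp
      · have hpre : List.isPrefixOf [c] (x :: t) = false := by
          simp [List.isPrefixOf]
          exact fun h' => hx h'.symm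
        simp only [PySem.Chars.replace.go, hpre]
        rw [ih t (x :: acc) (by simpa using Nat.le_of_succ_le_succ h)]
        simp [hx]

theorem replace_single (c : Char) (new l : List Char) :
    PySem.Chars.replace l [c] new = l.flatMap (fun x => if x = c then new else [x]) := by
  have : ([c] : List Char).isEmpty = false := rfl
  simp only [PySem.Chars.replace, this, Bool.false_eq_true, if_false]
  simpa using replace_go_single c new l.length l [] (le_refl _)

-- ===== VERDICT (by name: the statement is the Claim_ definition above) =====
set_option maxHeartbeats 2000000 in
theorem convert_from_yw_py_spec : Claim_equal_convert_from_yw_py := by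
  intro text quick _
  unfold Spec_convert_from_yw_py convert_from_yw_py convert_from_yw_py_alt odsReplacements
  simp only [List.foldl, PySem.Str.replace, PySem.Str.rstrip, String.toList_ofList]
  congr 1
  rw [show ("&" : String).toList = ['&'] from rfl,
      show ("\"" : String).toList = ['"'] from rfl,
      show ("'" : String).toList = ['\''] from rfl,
      show (">" : String).toList = ['>'] from rfl,
      show ("<" : String).toList = ['<'] from rfl,
      show ("\n" : String).toList = ['\n'] from rfl]
  rw [replace_single, replace_single, replace_single, replace_single, replace_single,
      replace_single]
  simp only [List.flatMap_assoc]
  refine List.flatMap_congr ?_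
  intro x _
  by_cases h1 : x = '&';  · subst h1; decide
  by_cases h2 : x = '"';  · subst h2; decide
  by_cases h3 : x = '\''; · subst h3; decide
  by_cases h4 : x = '>';  · subst h4; decide
  by_cases h5 : x = '<';  · subst h5; decide
  by_cases h6 : x = '\n'; · subst h6; decide
  simp [odsEsc, h1, h2, h3, h4, h5, h6]
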